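-- pv_equiv track=rewrite | github.com/modsim/FluxML | apps/flux.py | mask_to_range
-- ===== SOURCE A (Python) =====
-- def mask_to_range(mask):
-- 	"""converts a boolean mask into a range string,
-- 	e.g. [True,True,True,False,True] -> '1-3,5'"""
-- 	rangespec = []
-- 	i = 0
-- 	while i < len(mask):
-- 		if not mask[i]:
-- 			i = i+1
-- 			continue
-- 		j = i+1
-- 		while j < len(mask) and mask[j]:
-- 			j = j+1
-- 		j = j-1
--
-- 		if i != j:
-- 			rangespec.append('%i-%i' % (i+1,j+1))
-- 		else:
-- 			rangespec.append('%i' % (i+1))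
-- 		i = j+1
--
-- 	return ','.join(rangespec)
-- ===== SOURCE B (Python) =====
-- def mask_to_range(mask):
--     """converts a boolean mask into a range string,
--     e.g. [True,True,True,False,True] -> '1-3,5'"""
--     # edge detection: a run starts where True follows False, ends where False follows True
--     starts = [i for i, (m, p) in enumerate(zip(mask, [False] + mask), 1) if m and not p]
--     ends = [i for i, (m, q) in enumerate(zip(mask, mask[1:] + [False]), 1) if m and not q]
--     return ','.join('%i' % s if s == e else '%i-%i' % (s, e) for s, e in zip(starts, ends))
-- ===== Notes on version B (the rewrite author's own statement) =====
-- stated objective: alternative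
-- what changed: Instead of scanning runs with a nested scan-ahead loop, B detects run boundaries by comparing each element with its shifted neighbours (zip with the mask shifted by one), builds the lists of run starts and run ends in two staged comprehensions, and zips them into the range strings.
import Mathlib
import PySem

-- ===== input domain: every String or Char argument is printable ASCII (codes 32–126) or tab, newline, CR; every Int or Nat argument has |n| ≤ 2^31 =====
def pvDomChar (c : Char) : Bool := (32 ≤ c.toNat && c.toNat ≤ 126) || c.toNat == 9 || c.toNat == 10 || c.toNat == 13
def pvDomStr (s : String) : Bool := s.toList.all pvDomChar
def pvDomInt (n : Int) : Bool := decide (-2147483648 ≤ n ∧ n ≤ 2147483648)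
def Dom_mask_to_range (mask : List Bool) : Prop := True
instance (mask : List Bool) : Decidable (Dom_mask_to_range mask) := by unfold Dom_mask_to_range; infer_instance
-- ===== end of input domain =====

-- B replaces A's run scan (outer index loop with a nested scan-ahead inner loop) by
-- edge detection: two staged passes collect run starts and run ends by comparing each
-- element with its shifted neighbour, then the two boundary lists are zipped (alternative).

-- ===== PORT A =====
-- inner while loop: 'j = i+1; while j < len(mask) and mask[j]: j = j+1'
-- (fuel = len(mask) - j only makes the loop structurally recursive; the guard is unchanged)
def pvAInnerGo (mask : List Bool) : Nat → Nat → Nat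
  | 0, j => j
  | fuel + 1, j =>
    if h : j < mask.length then
      if mask[j] then pvAInnerGo mask fuel (j + 1) else j
    else j

def pvAInner (mask : List Bool) (j : Nat) : Nat := pvAInnerGo mask (mask.length - j) j

-- outer while loop of A, accumulating rangespec (fuel = len(mask) - i bounds the iterations)
def pvALoopGo (mask : List Bool) : Nat → Nat → List String → List String
  | 0, _, rangespec => rangespec
  | fuel + 1, i, rangespec =>
    if h : i < mask.length then
      if !mask[i] then pvALoopGo mask fuel (i + 1) rangespec
      else
        let j := pvAInner mask (i + 1) - 1
        let rangespec :=
          if i ≠ j then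
            rangespec ++ [PySem.Int.toStr ((i : Int) + 1) ++ "-" ++ PySem.Int.toStr ((j : Int) + 1)]
          else rangespec ++ [PySem.Int.toStr ((i : Int) + 1)]
        pvALoopGo mask fuel (j + 1) rangespec
    else rangespec

def mask_to_range (mask : List Bool) : String :=
  PySem.Str.join "," (pvALoopGo mask mask.length 0 [])

-- ===== PORT B =====
-- starts = [i for i, (m, p) in enumerate(zip(mask, [False] + mask), 1) if m and not p]
def pvBStarts (mask : List Bool) : List Int :=
  (PySem.List.enumerate (mask.zip (false :: mask)) 1).filterMap
    (fun q => if q.2.1 && !q.2.2 then some q.1 else none)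

-- ends = [i for i, (m, q) in enumerate(zip(mask, mask[1:] + [False]), 1) if m and not q]
def pvBEnds (mask : List Bool) : List Int :=
  (PySem.List.enumerate (mask.zip (mask.drop 1 ++ [false])) 1).filterMap
    (fun q => if q.2.1 && !q.2.2 then some q.1 else none)

-- ','.join('%i' % s if s == e else '%i-%i' % (s, e) for s, e in zip(starts, ends))
def mask_to_range_alt (mask : List Bool) : String :=
  PySem.Str.join ","
    (((pvBStarts mask).zip (pvBEnds mask)).map
      (fun se => if se.1 = se.2 then PySem.Int.toStr se.1
                 else PySem.Int.toStr se.1 ++ "-" ++ PySem.Int.toStr se.2))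

-- ===== PRECONDITION & SPEC =====
def Spec_mask_to_range (mask : List Bool) (out : String) : Prop := out = mask_to_range_alt mask
instance (mask : List Bool) (out : String) : Decidable (Spec_mask_to_range mask out) := by unfold Spec_mask_to_range; infer_instance

-- ===== CLAIM =====
def Claim_equal_mask_to_range : Prop := ∀ (mask : List Bool), Dom_mask_to_range mask → Spec_mask_to_range mask (mask_to_range mask)

-- ===== LEMMAS AND PROOFS =====

-- canonical structural form of the rangespec list: p is the 0-based position of l's head
def pvG (l : List Bool) (p : Nat) : List String :=
  match l with
  | [] => []
  | false :: t => pvG t (p + 1)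
  | true :: t =>
    let n := (t.takeWhile (fun b => b)).length
    (if n = 0 then PySem.Int.toStr ((p : Int) + 1)
     else PySem.Int.toStr ((p : Int) + 1) ++ "-" ++ PySem.Int.toStr ((p : Int) + n + 1))
      :: pvG (t.drop n) (p + n + 1)
termination_by l.length
decreasing_by
  all_goals simp [List.length_drop]

theorem pvAInnerGo_eq (mask : List Bool) (fuel j : Nat) (hf : mask.length ≤ j + fuel) :
    pvAInnerGo mask fuel j = j + ((mask.drop j).takeWhile (fun b => b)).length := by
  induction fuel generalizing j with
  | zero =>
    rw [pvAInnerGo, List.drop_eq_nil_of_le (by omega)]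
    simp
  | succ fuel ih =>
    rw [pvAInnerGo]
    by_cases h : j < mask.length
    · rw [dif_pos h, ← List.getElem_cons_drop h, List.takeWhile_cons]
      by_cases hb : mask[j]
      · rw [hb, if_pos rfl, ih (j + 1) (by omega)]
        simp
        omega
      · simp at hb
        rw [hb]
        simp
    · rw [dif_neg h, List.drop_eq_nil_of_le (by omega)]
      simp

theorem pvAInner_eq (mask : List Bool) (j : Nat) :
    pvAInner mask j = j + ((mask.drop j).takeWhile (fun b => b)).length :=
  pvAInnerGo_eq mask (mask.length - j) j (by omega)

theorem pvALoopGo_eq (mask : List Bool) (fuel i : Nat) (acc : List String)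
    (hf : mask.length ≤ i + fuel) :
    pvALoopGo mask fuel i acc = acc ++ pvG (mask.drop i) i := by
  induction fuel generalizing i acc with
  | zero =>
    rw [pvALoopGo, List.drop_eq_nil_of_le (by omega), pvG]
    simp
  | succ fuel ih =>
    rw [pvALoopGo]
    by_cases h : i < mask.length
    · rw [dif_pos h]
      by_cases hb : mask[i]
      · rw [if_neg (by simp [hb])]
        have hinner := pvAInner_eq mask (i + 1)
        set n := ((mask.drop (i + 1)).takeWhile (fun b => b)).length with hn
        set j := pvAInner mask (i + 1) - 1 with hjdef
        have hj : j = i + n := by omega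
        rw [ih (j + 1) _ (by omega), ← List.getElem_cons_drop h, hb, pvG, ← hn]
        have hdrop : (mask.drop (i + 1)).drop n = mask.drop (j + 1) := by
          rw [List.drop_drop]; congr 1; omega
        rw [hdrop]
        by_cases h0 : n = 0
        · rw [if_neg (by omega), if_pos h0]
          have : j + 1 = i + n + 1 := by omega
          rw [this]
          simp
        · rw [if_pos (by omega), if_neg h0]
          have h1 : ((j : Nat) : Int) + 1 = (i : Int) + n + 1 := by omega
          have h2 : j + 1 = i + n + 1 := by omega
          rw [h1, h2]
          simp
      · simp at hb
        rw [if_pos (by simp [hb]), ih (i + 1) _ (by omega), ← List.getElem_cons_drop h, hb, pvG]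
    · rw [dif_neg h, List.drop_eq_nil_of_le (by omega), pvG]
      simp

-- functional characterisations of B's two boundary passes:
-- pvS l prev p = run starts of l when the element before l is prev and l starts at 0-based p
def pvS (l : List Bool) (prev : Bool) (p : Nat) : List Int :=
  match l with
  | [] => []
  | x :: t => (if x && !prev then [((p : Int) + 1)] else []) ++ pvS t x (p + 1)

-- pvE l p = run ends of l (an element is an end if the next one is false / absent)
def pvE (l : List Bool) (p : Nat) : List Int :=
  match l with
  | [] => []
  | x :: t => (if x && !(t.headD false) then [((p : Int) + 1)] else []) ++ pvE t (p + 1)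

theorem pvBStarts_go (l : List Bool) (prev : Bool) (p : Nat) :
    (PySem.List.enumerate (l.zip (prev :: l)) ((p : Int) + 1)).filterMap
      (fun q => if q.2.1 && !q.2.2 then some q.1 else none) = pvS l prev p := by
  induction l generalizing prev p with
  | nil => simp [pvS, PySem.List.enumerate_nil]
  | cons x t ih =>
    rw [List.zip_cons_cons, PySem.List.enumerate_cons, List.filterMap_cons, pvS]
    have hcast : ((p : Int) + 1) + 1 = (((p + 1 : Nat) : Int) + 1) := by push_cast; ring
    rw [hcast, ih x (p + 1)]
    by_cases h : x && !prev
    · simp [h]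
    · simp [h]

theorem pvBEnds_go (l : List Bool) (p : Nat) :
    (PySem.List.enumerate (l.zip (l.drop 1 ++ [false])) ((p : Int) + 1)).filterMap
      (fun q => if q.2.1 && !q.2.2 then some q.1 else none) = pvE l p := by
  induction l generalizing p with
  | nil => simp [pvE, PySem.List.enumerate_nil]
  | cons x t ih =>
    have hd : (x :: t).zip ((x :: t).drop 1 ++ [false])
        = (x, t.headD false) :: t.zip (t.drop 1 ++ [false]) := by
      cases t <;> simp
    rw [hd, PySem.List.enumerate_cons, List.filterMap_cons, pvE]
    have hcast : ((p : Int) + 1) + 1 = (((p + 1 : Nat) : Int) + 1) := by push_cast; ring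
    rw [hcast, ih (p + 1)]
    by_cases h : x = true ∧ t.head?.getD false = false
    · simp [h]
    · simp [h]

-- inside a run, pvS emits nothing until the run's trues are consumed
theorem pvS_run (t : List Bool) (q : Nat) :
    pvS t true q = pvS (t.drop (t.takeWhile (fun b => b)).length) false
      (q + (t.takeWhile (fun b => b)).length) := by
  induction t generalizing q with
  | nil => simp [pvS]
  | cons x t ih =>
    cases x with
    | false => simp [pvS]
    | true =>
      rw [List.takeWhile_cons_of_pos (by rfl)]
      simp only [List.length_cons, List.drop_succ_cons]
      have h1 : pvS (true :: t) true q = pvS t true (q + 1) := by simp [pvS]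
      rw [h1, ih (q + 1)]
      have h2 : q + 1 + (t.takeWhile (fun b => b)).length
          = q + ((t.takeWhile (fun b => b)).length + 1) := by omega
      rw [h2]

-- a run of k+1 trues at position p ends at p + k + 1 (1-based), i.e. pvE of the run head
theorem pvE_run (t : List Bool) (q : Nat) :
    pvE (true :: t) q
      = ((q : Int) + (t.takeWhile (fun b => b)).length + 1)
        :: pvE (t.drop (t.takeWhile (fun b => b)).length)
             (q + (t.takeWhile (fun b => b)).length + 1) := by
  induction t generalizing q with
  | nil => simp [pvE]
  | cons x t ih =>
    cases x with
    | false => simp [pvE]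
    | true =>
      rw [List.takeWhile_cons_of_pos (by rfl)]
      simp only [List.length_cons, List.drop_succ_cons]
      have h1 : pvE (true :: true :: t) q = pvE (true :: t) (q + 1) := by
        simp [pvE]
      rw [h1, ih (q + 1)]
      have hh : (((q + 1 : Nat)) : Int) + ((t.takeWhile (fun b => b)).length : Int) + 1
          = (q : Int) + (((t.takeWhile (fun b => b)).length + 1 : Nat) : Int) + 1 := by
        push_cast; ring
      have hp : q + 1 + (t.takeWhile (fun b => b)).length + 1
          = q + ((t.takeWhile (fun b => b)).length + 1) + 1 := by omega
      rw [hh, hp]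

-- B's zipped, formatted boundary lists coincide with the canonical rangespec pvG
theorem pvSE_eq_pvG (l : List Bool) (p : Nat) :
    ((pvS l false p).zip (pvE l p)).map
      (fun se => if se.1 = se.2 then PySem.Int.toStr se.1
                 else PySem.Int.toStr se.1 ++ "-" ++ PySem.Int.toStr se.2) = pvG l p := by
  induction hl : l.length using Nat.strong_induction_on generalizing l p with
  | _ m ih =>
  cases l with
  | nil => simp [pvS, pvE, pvG]
  | cons x t =>
    cases x with
    | false =>
      rw [pvG]
      have hS : pvS (false :: t) false p = pvS t false (p + 1) := by simp [pvS]
      have hE : pvE (false :: t) p = pvE t (p + 1) := by simp [pvE]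
      rw [hS, hE, ih t.length (by simp [← hl]) t (p + 1) rfl]
    | true =>
      rw [pvG]
      set n := (t.takeWhile (fun b => b)).length with hn
      have e1 : pvS (true :: t) false p = ((p : Int) + 1) :: pvS t true (p + 1) := by
        simp [pvS]
      have e2 : pvS t true (p + 1) = pvS (t.drop n) false (p + n + 1) := by
        rw [pvS_run t (p + 1), ← hn]
        have h3 : p + 1 + n = p + n + 1 := by omega
        rw [h3]
      have e3 : pvE (true :: t) p = ((p : Int) + n + 1) :: pvE (t.drop n) (p + n + 1) := by
        rw [pvE_run t p, ← hn]
      have hlen : (t.drop n).length < m := by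
        have h4 : (t.takeWhile (fun b => b)).length ≤ t.length := (List.takeWhile_sublist _).length_le
        simp only [List.length_drop, ← hl, List.length_cons]
        omega
      rw [e1, e2, e3, List.zip_cons_cons, List.map_cons,
        ih (t.drop n).length hlen (t.drop n) (p + n + 1) rfl]
      by_cases h0 : n = 0
      · simp [h0]
      · have hne : ((p : Int) + 1) ≠ ((p : Int) + n + 1) := by omega
        simp [hne, h0]

-- ===== VERDICT =====
theorem mask_to_range_spec : Claim_equal_mask_to_range := by
  intro mask _
  unfold Spec_mask_to_range mask_to_range mask_to_range_alt pvBStarts pvBEnds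
  rw [pvALoopGo_eq mask mask.length 0 [] (by omega)]
  have hs := pvBStarts_go mask false 0
  have he := pvBEnds_go mask 0
  simp only [Nat.cast_zero, zero_add] at hs he
  rw [hs, he, pvSE_eq_pvG mask 0]
  simp
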